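-- pv_equiv track=rewrite | github.com/jokh0108/study-algorithm | practice/baekjoon/baekjoon-1992.py | make_quadtree
-- ===== SOURCE A (Python) =====
-- from typing import List
--
-- def can_compress(video_1d: str):
--     return len(set(video_1d)) == 1
--
-- def make_quadtree(n: int, video: List[str]):
--     if n == 0:
--         return
--     video_1d = "".join(video)
--     if can_compress(video_1d):
--         return video_1d[0]
--     half = n // 2
--     I = [row[:half] for row in video[:half]]
--     II = [row[half:] for row in video[:half]]
--     III = [row[:half] for row in video[half:]]
--     IV = [row[half:] for row in video[half:]]
--     return f"({make_quadtree(half, I)}{make_quadtree(half, II)}{make_quadtree(half, III)}{make_quadtree(half, IV)})"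
-- ===== SOURCE B (Python) =====
-- from typing import List, Optional
--
-- def make_quadtree(n: int, video: List[str]) -> Optional[str]:
--     # Quadtree over the grid by index arithmetic: per-row run-length arrays make a
--     # region's uniformity test touch one entry per row instead of every cell.
--     runs = []
--     for row in video:
--         m = len(row)
--         r = [0] * m
--         for j in range(m - 1, -1, -1):
--             r[j] = r[j + 1] + 1 if j + 1 < m and row[j + 1] == row[j] else 1
--         runs.append(r)
--
--     def uniform(a: int, b: int, c: int, d: Optional[int]) -> Optional[str]:
--         ch = None
--         for row, run in zip(video[a:b], runs[a:b]):
--             seg = row[c:d]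
--             if not seg:
--                 continue
--             if run[c] < len(seg):
--                 return None
--             if ch is None:
--                 ch = seg[0]
--             elif seg[0] != ch:
--                 return None
--         return ch
--
--     def go(n: int, a: int, b: int, c: int, d: Optional[int]) -> Optional[str]:
--         if n == 0:
--             return None
--         ch = uniform(a, b, c, d)
--         if ch is not None:
--             return ch
--         half = n // 2
--         return (f"({go(half, a, a + half, c, c + half)}"
--                 f"{go(half, a, a + half, c + half, d)}"
--                 f"{go(half, a + half, b, c, c + half)}"
--                 f"{go(half, a + half, b, c + half, d)})")
--
--     return go(n, 0, len(video), 0, None)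
-- ===== Notes on version B (the rewrite author's own statement) =====
-- stated objective: alternative
-- what changed: B replaces A's slice-copy-and-rescan recursion (materializing four subgrids and set(join)-testing each) with a recursion over nominal index bounds into the original grid plus precomputed per-row run-length arrays, so each region's uniformity test touches one entry per row instead of every cell. Pre_ excludes negative n, outside the task's natural domain: there A usually dies with RecursionError (n//2 never reaches 0), though on a grid that is uniform at first sight it still returns the character before recursing — B does the same there.
-- outside the precondition, e.g. on make_quadtree(-2, ['aa']): A returns 'a', B returns 'a'
import Mathlib
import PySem

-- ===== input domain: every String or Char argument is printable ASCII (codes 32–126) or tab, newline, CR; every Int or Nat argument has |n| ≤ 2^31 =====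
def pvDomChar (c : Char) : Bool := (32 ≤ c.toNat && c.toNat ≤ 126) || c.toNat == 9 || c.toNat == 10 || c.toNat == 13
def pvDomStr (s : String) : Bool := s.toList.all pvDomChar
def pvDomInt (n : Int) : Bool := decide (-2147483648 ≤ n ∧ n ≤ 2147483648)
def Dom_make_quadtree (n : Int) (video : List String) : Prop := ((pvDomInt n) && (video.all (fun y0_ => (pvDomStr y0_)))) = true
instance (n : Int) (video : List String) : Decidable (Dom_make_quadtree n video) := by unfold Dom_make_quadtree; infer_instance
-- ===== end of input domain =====

-- B re-implements the quadtree by recursion on index bounds into the original grid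
-- (per-row run-length arrays instead of re-scanning sliced copies); same return value, no speed claim.

-- strings are carried as List Char (PySem's proof representation); String.ofList at the boundary

-- f-string interpolation of an Optional[str] (both Pythons compose child results this way)
def pvFstr : Option (List Char) → List Char
  | none => ['N', 'o', 'n', 'e']
  | some s => s

-- ===== PORT A =====

def can_compress (video_1d : List Char) : Bool :=
  PySem.Set.len (PySem.Set.ofList video_1d) == 1

-- A's recursion; the fuel only makes the Python recursion (n halving each level) structural
def quadA : Nat → Int → List (List Char) → Option (List Char)
  | 0, _, _ => none
  | fuel+1, n, video =>
    if n = 0 then none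
    else
      let video_1d := PySem.Chars.join [] video
      if can_compress video_1d then
        (PySem.List.pyGet? video_1d 0).map (fun c => [c])
      else
        let half := PySem.Int.floordiv n 2
        let I   := (PySem.List.slice video none (some half)).map (fun r => PySem.List.slice r none (some half))
        let II  := (PySem.List.slice video none (some half)).map (fun r => PySem.List.slice r (some half) none)
        let III := (PySem.List.slice video (some half) none).map (fun r => PySem.List.slice r none (some half))
        let IV  := (PySem.List.slice video (some half) none).map (fun r => PySem.List.slice r (some half) none)
        some (('(' :: pvFstr (quadA fuel half I)) ++ pvFstr (quadA fuel half II) ++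
              pvFstr (quadA fuel half III) ++ pvFstr (quadA fuel half IV) ++ [')'])

def make_quadtree (n : Int) (video : List String) : Option String :=
  (quadA (n.toNat + 1) n (video.map String.toList)).map (fun cs => String.ofList cs)

-- ===== PORT B =====

-- right-to-left run-length array: r[j] = length of the equal-char run starting at j
def pvRunsOf : List Char → List Nat
  | [] => []
  | x :: rest =>
    let rr := pvRunsOf rest
    (match rest, rr with
     | y :: _, k :: _ => if y != x then 1 else k + 1
     | _, _ => 1) :: rr

-- row[c:d] for 0 ≤ c (and 0 ≤ d); exact: a Python slice with nonnegative bounds is drop-then-take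
def segOf (c : Nat) (d : Option Nat) (row : List Char) : List Char :=
  match d with
  | none => row.drop c
  | some dd => (row.drop c).take (dd - c)

-- the `for row, run in zip(video[a:b], runs[a:b])` loop of B's `uniform`
def pvUniLoop (c : Nat) (d : Option Nat) : List (List Char × List Nat) → Option Char → Option Char
  | [], ch => ch
  | (row, run) :: rest, ch =>
    let seg := segOf c d row
    if seg.isEmpty then pvUniLoop c d rest ch
    else if run.getD c 0 < seg.length then none
    else
      match ch with
      | none => pvUniLoop c d rest (some (seg.headD ' '))   -- seg[0] on a nonempty seg
      | some ch0 => if seg.headD ' ' != ch0 then none else pvUniLoop c d rest (some ch0)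

def pvUniform (rows : List (List Char)) (runs : List (List Nat)) (a b c : Nat) (d : Option Nat) : Option Char :=
  pvUniLoop c d ((((rows.drop a).take (b - a))).zip (((runs.drop a).take (b - a)))) none

-- B's `go` (coordinates stay nonnegative throughout, so they are carried as Nat)
def pvGoB : Nat → List (List Char) → List (List Nat) → Int → Nat → Nat → Nat → Option Nat → Option (List Char)
  | 0, _, _, _, _, _, _, _ => none
  | fuel+1, rows, runs, n, a, b, c, d =>
    if n = 0 then none
    else
      match pvUniform rows runs a b c d with
      | some ch => some [ch]
      | none =>
        let half := PySem.Int.floordiv n 2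
        let h := half.toNat   -- n ≥ 1 here, so half is its own toNat
        some (('(' :: pvFstr (pvGoB fuel rows runs half a (a + h) c (some (c + h)))) ++
              pvFstr (pvGoB fuel rows runs half a (a + h) (c + h) d) ++
              pvFstr (pvGoB fuel rows runs half (a + h) b c (some (c + h))) ++
              pvFstr (pvGoB fuel rows runs half (a + h) b (c + h) d) ++ [')'])

def make_quadtree_alt (n : Int) (video : List String) : Option String :=
  let rows := video.map String.toList
  let runs := rows.map pvRunsOf
  (pvGoB (n.toNat + 1) rows runs n 0 rows.length 0 none).map (fun cs => String.ofList cs)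

-- ===== PRECONDITION & SPEC =====
-- Pre_ excludes negative n (outside the task's natural domain: n is the grid size). There A
-- usually dies with RecursionError (n//2 of a negative n never reaches 0), though on a video
-- that is uniform at first sight it returns the character before recursing; B behaves the
-- same on those inputs, they are simply not claimed. A returns normally on every n ≥ 0.
def Pre_make_quadtree (n : Int) (video : List String) : Prop := 0 ≤ n
instance (n : Int) (video : List String) : Decidable (Pre_make_quadtree n video) := by unfold Pre_make_quadtree; infer_instance

def pvWitness_make_quadtree : Int × List String := (2, ["01", "10"])

def Spec_make_quadtree (n : Int) (video : List String) (out : Option String) : Prop := out = make_quadtree_alt n video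
instance (n : Int) (video : List String) (out : Option String) : Decidable (Spec_make_quadtree n video out) := by unfold Spec_make_quadtree; infer_instance

-- ===== CLAIM (what is proved, stated in full; the proofs are below) =====
def Claim_equal_make_quadtree : Prop := ∀ (n : Int) (video : List String), Dom_make_quadtree n video → Pre_make_quadtree n video → Spec_make_quadtree n video (make_quadtree n video)

-- ===== LEMMAS AND PROOFS =====

-- the subgrid A's nested slicing denotes: rows [a, b), columns [c, d) (d = none: to end of row)
def extract (rows : List (List Char)) (a b c : Nat) (d : Option Nat) : List (List Char) :=
  ((rows.drop a).take (b - a)).map (segOf c d)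

-- effective end column of the row segment [c, d) (proof-side abbreviation)
def pvSegEnd (row : List Char) (d : Option Nat) : Nat :=
  match d with
  | none => row.length
  | some dd => min dd row.length

-- `some x` iff the list is nonempty and all its chars equal x
def allEqOpt : List Char → Option Char
  | [] => none
  | x :: xs => if xs.all (· == x) then some x else none

-- length of the leading equal-char run
def runLen : List Char → Nat
  | [] => 0
  | x :: xs => 1 + (xs.takeWhile (· == x)).length

theorem join_nil_eq_flatten (xss : List (List Char)) : PySem.Chars.join [] xss = xss.flatten := by
  induction xss with
  | nil => rfl
  | cons h t ih =>
    cases t with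
    | nil => simp [PySem.Chars.join, List.intercalate]
    | cons h2 t2 =>
      simp only [PySem.Chars.join, List.intercalate] at ih ⊢
      simp [List.intersperse] at ih ⊢
      exact ih

theorem runsOf_getD (row : List Char) (c : Nat) : (pvRunsOf row).getD c 0 = runLen (row.drop c) := by
  induction row generalizing c with
  | nil => simp [pvRunsOf, runLen]
  | cons x rest ih =>
    cases c with
    | succ c' => simpa [pvRunsOf] using ih c'
    | zero =>
      simp only [pvRunsOf, List.drop_zero, List.getD_cons_zero]
      cases rest with
      | nil => simp [runLen]
      | cons y t =>
        have h0 := ih 0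
        simp only [List.drop_zero] at h0
        cases hrr : pvRunsOf (y :: t) with
        | nil => simp [pvRunsOf] at hrr
        | cons k ks =>
          rw [hrr] at h0
          simp only [List.getD_cons_zero] at h0
          by_cases hxy : y = x
          · subst hxy
            simp only [runLen, List.takeWhile]
            simp [h0, runLen]
            omega
          · simp [runLen, hxy, bne_iff_ne]

theorem takeWhile_len_ge (p : Char → Bool) (xs : List Char) (m : Nat) (hm : m ≤ xs.length) :
    (m ≤ (xs.takeWhile p).length) ↔ ((xs.take m).all p = true) := by
  induction xs generalizing m with
  | nil => simp at hm; simp [hm]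
  | cons x t ih =>
    cases m with
    | zero => simp
    | succ m' =>
      by_cases hp : p x
      · simp [List.takeWhile_cons, hp, Nat.succ_le_succ_iff, ih m' (by simpa using hm)]
      · simp [List.takeWhile_cons, hp]

theorem runLen_ge_iff (x : Char) (xs : List Char) (k : Nat) (hk : k ≤ xs.length + 1) :
    (k ≤ runLen (x :: xs)) ↔ (((x :: xs).take k).all (· == x) = true) := by
  cases k with
  | zero => simp [runLen]
  | succ k' =>
    simp only [runLen, List.take_succ_cons, List.all_cons, beq_self_eq_true, Bool.true_and]
    rw [← takeWhile_len_ge (· == x) xs k' (by omega)]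
    omega

theorem ofList_allEq (x : Char) (xs : List Char) (h : xs.all (· == x) = true) :
    PySem.Set.ofList (x :: xs) = [x] := by
  have : ∀ (s : List Char), x ∈ s → List.foldl PySem.Set.add s xs = s := by
    intro s hs
    induction xs with
    | nil => simp
    | cons y t iht =>
      simp only [List.all_cons, Bool.and_eq_true, beq_iff_eq] at h
      obtain ⟨hy, ht⟩ := h
      subst hy
      simp only [List.foldl_cons, PySem.Set.add]
      rw [if_pos (by simpa using hs)]
      exact iht ht
  show List.foldl PySem.Set.add PySem.Set.empty (x :: xs) = [x]
  simp only [List.foldl_cons]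
  have he : PySem.Set.add PySem.Set.empty x = [x] := by rfl
  rw [he]
  exact this [x] (by simp)

theorem can_compress_of_allEq (v : List Char) (x : Char) (h : allEqOpt v = some x) :
    can_compress v = true ∧ PySem.List.pyGet? v 0 = some x := by
  cases v with
  | nil => simp [allEqOpt] at h
  | cons y xs =>
    simp only [allEqOpt] at h
    by_cases hall : xs.all (· == y) = true
    · rw [if_pos hall] at h
      have hxy : y = x := by simpa using h
      subst hxy
      constructor
      · show (PySem.Set.len (PySem.Set.ofList (y :: xs)) == 1) = true
        rw [ofList_allEq _ xs hall]
        rfl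
      · simp [PySem.List.pyGet?_zero]
    · rw [if_neg hall] at h; exact absurd h (by simp)

theorem can_compress_of_not_allEq (v : List Char) (h : allEqOpt v = none) :
    can_compress v = false := by
  cases v with
  | nil => rfl
  | cons y xs =>
    simp only [allEqOpt] at h
    by_cases hall : xs.all (· == y) = true
    · rw [if_pos hall] at h; exact absurd h (by simp)
    · simp only [List.all_eq_true, beq_iff_eq] at hall
      push_neg at hall
      obtain ⟨z, hz, hne⟩ := hall
      apply Bool.eq_false_iff.mpr
      intro hc
      have hlen : (PySem.Set.ofList (y :: xs)).length = 1 := by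
        have h2 : (PySem.Set.len (PySem.Set.ofList (y :: xs)) == 1) = true := hc
        have h3 : PySem.Set.len (PySem.Set.ofList (y :: xs)) = 1 := by
          exact_mod_cast beq_iff_eq.mp h2
        simpa [PySem.Set.len] using h3
      obtain ⟨w, hw⟩ := List.length_eq_one_iff.mp hlen
      have hy : y ∈ PySem.Set.ofList (y :: xs) := (PySem.Set.mem_ofList _ _).mpr (by simp)
      have hzz : z ∈ PySem.Set.ofList (y :: xs) := (PySem.Set.mem_ofList _ _).mpr (by simp [hz])
      rw [hw] at hy hzz
      simp only [List.mem_singleton] at hy hzz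
      exact hne (hzz.trans hy.symm)

theorem segEnd_le_length (row : List Char) (d : Option Nat) : pvSegEnd row d ≤ row.length := by
  cases d <;> simp [pvSegEnd]

theorem seg_take (row : List Char) (c : Nat) (d : Option Nat) :
    segOf c d row = (row.drop c).take (pvSegEnd row d - c) := by
  cases d with
  | none =>
    simp only [segOf, pvSegEnd]
    rw [List.take_of_length_le (by simp)]
  | some dd =>
    simp only [segOf, pvSegEnd]
    rcases Nat.le_total dd row.length with hd | hd
    · rw [Nat.min_eq_left hd]
    · rw [Nat.min_eq_right hd]
      by_cases hcl : row.length ≤ c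
      · simp [List.drop_eq_nil_of_le hcl]
      · rw [List.take_of_length_le (by simp; omega), List.take_of_length_le (by simp)]

theorem seg_length (row : List Char) (c : Nat) (d : Option Nat) :
    (segOf c d row).length = pvSegEnd row d - c := by
  rw [seg_take]
  have := segEnd_le_length row d
  simp only [List.length_take, List.length_drop]
  omega

theorem seg_cons (row : List Char) (c : Nat) (d : Option Nat) (h : c < pvSegEnd row d) :
    segOf c d row = row.getD c ' ' :: ((row.drop (c+1)).take (pvSegEnd row d - (c+1))) := by
  have hc : c < row.length := lt_of_lt_of_le h (segEnd_le_length row d)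
  rw [seg_take]
  rw [List.drop_eq_getElem_cons hc]
  have : pvSegEnd row d - c = (pvSegEnd row d - (c+1)) + 1 := by omega
  rw [this, List.take_succ_cons, List.getD_eq_getElem row ' ' hc]

theorem seg_uniform_iff (row : List Char) (c : Nat) (d : Option Nat) (h : c < pvSegEnd row d) :
    (pvSegEnd row d - c ≤ (pvRunsOf row).getD c 0) ↔
      ((segOf c d row).all (· == row.getD c ' ') = true) := by
  have hc : c < row.length := lt_of_lt_of_le h (segEnd_le_length row d)
  have hle := segEnd_le_length row d
  rw [runsOf_getD, List.drop_eq_getElem_cons hc]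
  rw [runLen_ge_iff _ _ _ (by simp; omega)]
  rw [seg_take, List.drop_eq_getElem_cons hc, List.getD_eq_getElem row ' ' hc]

-- unfolding pvUniLoop's cons case through pvSegEnd
theorem pvUniLoop_cons (c : Nat) (d : Option Nat) (row : List Char) (run : List Nat)
    (rest : List (List Char × List Nat)) (ch : Option Char) :
    pvUniLoop c d ((row, run) :: rest) ch =
      (if pvSegEnd row d ≤ c then pvUniLoop c d rest ch
       else if run.getD c 0 < pvSegEnd row d - c then none
       else
         match ch with
         | none => pvUniLoop c d rest (some (row.getD c ' '))
         | some ch0 => if row.getD c ' ' != ch0 then none else pvUniLoop c d rest (some ch0)) := by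
  show (if (segOf c d row).isEmpty then pvUniLoop c d rest ch
        else if run.getD c 0 < (segOf c d row).length then none
        else
          match ch with
          | none => pvUniLoop c d rest (some ((segOf c d row).headD ' '))
          | some ch0 => if (segOf c d row).headD ' ' != ch0 then none
                        else pvUniLoop c d rest (some ch0)) = _
  by_cases he : pvSegEnd row d ≤ c
  · have hemp : (segOf c d row).isEmpty = true := by
      rw [List.isEmpty_iff_length_eq_zero, seg_length]; omega
    rw [if_pos hemp, if_pos he]
  · push_neg at he
    have hne : (segOf c d row).isEmpty = false := by
      rw [List.isEmpty_eq_false_iff_exists_mem]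
      rw [seg_cons row c d he]; exact ⟨_, List.mem_cons_self⟩
    have hhd : (segOf c d row).headD ' ' = row.getD c ' ' := by
      rw [seg_cons row c d he]; rfl
    rw [hne, seg_length, hhd]
    simp only [Bool.false_eq_true, if_false]
    rw [if_neg (by omega : ¬ pvSegEnd row d ≤ c)]

theorem uniLoop_spec (c : Nat) (d : Option Nat) (pairs : List (List Char × List Nat))
    (hp : ∀ p ∈ pairs, p.2 = pvRunsOf p.1) :
    pvUniLoop c d pairs none = allEqOpt ((pairs.map (fun p => segOf c d p.1)).flatten) ∧
    ∀ x, pvUniLoop c d pairs (some x) =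
      (if ((pairs.map (fun p => segOf c d p.1)).flatten).all (· == x) then some x else none) := by
  induction pairs with
  | nil => simp [pvUniLoop, allEqOpt]
  | cons p rest ih =>
    obtain ⟨row, run⟩ := p
    have hrw : run = pvRunsOf row := hp (row, run) (by simp)
    subst hrw
    have ihr := ih (fun q hq => hp q (by simp [hq]))
    by_cases he : pvSegEnd row d ≤ c
    · have hseg : segOf c d row = [] := by
        have := seg_length row c d
        refine List.eq_nil_of_length_eq_zero ?_
        omega
      simp only [pvUniLoop_cons, List.map_cons, List.flatten_cons, hseg, List.nil_append, if_pos he]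
      exact ihr
    · push_neg at he
      have hcons := seg_cons row c d he
      set x0 := row.getD c ' ' with hx0
      set t := (row.drop (c+1)).take (pvSegEnd row d - (c+1)) with ht
      by_cases hu : pvSegEnd row d - c ≤ (pvRunsOf row).getD c 0
      · -- uniform segment with char x0
        have hall : (segOf c d row).all (· == x0) = true := (seg_uniform_iff row c d he).mp hu
        have htall : t.all (· == x0) = true := by
          rw [hcons] at hall; simpa using hall
        constructor
        · rw [pvUniLoop_cons, if_neg (by omega : ¬ pvSegEnd row d ≤ c),
            if_neg (by omega : ¬ (pvRunsOf row).getD c 0 < pvSegEnd row d - c)]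
          rw [show (match (none : Option Char) with
                | none => pvUniLoop c d rest (some (row.getD c ' '))
                | some ch0 => if row.getD c ' ' != ch0 then none else pvUniLoop c d rest (some ch0))
              = pvUniLoop c d rest (some x0) from rfl]
          rw [ihr.2 x0]
          simp only [List.map_cons, List.flatten_cons, hcons, List.cons_append, allEqOpt,
            List.all_append, htall, Bool.true_and]
        · intro x
          rw [pvUniLoop_cons, if_neg (by omega : ¬ pvSegEnd row d ≤ c),
            if_neg (by omega : ¬ (pvRunsOf row).getD c 0 < pvSegEnd row d - c)]
          show (if x0 != x then none else pvUniLoop c d rest (some x)) = _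
          by_cases hxx : x0 = x
          · subst hxx
            simp only [bne_self_eq_false, Bool.false_eq_true, if_false, ihr.2 x0]
            simp only [List.map_cons, List.flatten_cons, List.all_append, hall, Bool.true_and]
          · rw [if_pos (by simpa [bne_iff_ne] using hxx)]
            have hsf : ((segOf c d row).all (· == x) = false) := by
              refine List.all_eq_false.mpr ⟨x0, ?_, by simpa using hxx⟩
              rw [hcons]; simp
            simp only [List.map_cons, List.flatten_cons, List.all_append, hsf, Bool.false_and]
            simp
      · -- non-uniform segment: B early-returns None, and no char equals the whole region
        push_neg at hu
        have hfail : ¬ ((segOf c d row).all (· == x0) = true) := by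
          intro hall; exact absurd ((seg_uniform_iff row c d he).mpr hall) (by omega)
        obtain ⟨y, hy, hyne⟩ : ∃ y ∈ segOf c d row, ¬ (y == x0) = true := by
          simpa using List.all_eq_false.mp (Bool.eq_false_iff.mpr hfail)
        have hmem0 : x0 ∈ segOf c d row := by rw [hcons]; simp
        have hsegall : ∀ z, (segOf c d row).all (· == z) = false := by
          intro z
          by_cases hz : x0 = z
          · exact List.all_eq_false.mpr ⟨y, hy, by subst hz; simpa using hyne⟩
          · exact List.all_eq_false.mpr ⟨x0, hmem0, by simpa using hz⟩
        have htf : t.all (· == x0) = false := by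
          have := hsegall x0
          rw [hcons] at this; simpa using this
        constructor
        · rw [pvUniLoop_cons, if_neg (by omega : ¬ pvSegEnd row d ≤ c),
            if_pos (by omega : (pvRunsOf row).getD c 0 < pvSegEnd row d - c)]
          simp only [List.map_cons, List.flatten_cons, hcons, List.cons_append, allEqOpt,
            List.all_append, htf, Bool.false_and]
          simp
        · intro x
          rw [pvUniLoop_cons, if_neg (by omega : ¬ pvSegEnd row d ≤ c),
            if_pos (by omega : (pvRunsOf row).getD c 0 < pvSegEnd row d - c)]
          simp only [List.map_cons, List.flatten_cons, List.all_append, hsegall x, Bool.false_and]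
          simp

theorem zip_runs (rows : List (List Char)) :
    rows.zip (rows.map pvRunsOf) = rows.map (fun r => (r, pvRunsOf r)) := by
  induction rows with
  | nil => rfl
  | cons r t ih => simpa using ih

theorem uniform_spec (rows : List (List Char)) (a b c : Nat) (d : Option Nat) :
    pvUniform rows (rows.map pvRunsOf) a b c d = allEqOpt ((extract rows a b c d).flatten) := by
  unfold pvUniform
  rw [← List.map_drop, ← List.map_take, zip_runs ((rows.drop a).take (b - a))]
  have hsp := uniLoop_spec c d ((((rows.drop a).take (b - a))).map (fun r => (r, pvRunsOf r)))
    (by intro p hp; obtain ⟨r, _, rfl⟩ := List.mem_map.mp hp; rfl)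
  rw [hsp.1, List.map_map]
  rfl

theorem seg_take_h (r : List Char) (c h : Nat) (d : Option Nat)
    (hcol : ∀ dd, d = some dd → h ≤ dd - c) :
    (segOf c d r).take h = segOf c (some (c + h)) r := by
  cases d with
  | none =>
    simp only [segOf]
    congr 1; omega
  | some dd =>
    have hdd := hcol dd rfl
    simp only [segOf, List.take_take]
    congr 1; omega

theorem seg_drop_h (r : List Char) (c h : Nat) (d : Option Nat) :
    (segOf c d r).drop h = segOf (c + h) d r := by
  cases d with
  | none => simp only [segOf, List.drop_drop]
  | some dd =>
    simp only [segOf, List.drop_take, List.drop_drop]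
    congr 1; omega

theorem rows_take_h (rows : List (List Char)) (a b h : Nat)
    (hrow : h ≤ b - a ∨ rows.length ≤ b) :
    ((rows.drop a).take (b - a)).take h = (rows.drop a).take ((a + h) - a) := by
  rw [List.take_take]
  have hh : (a + h) - a = h := by omega
  rw [hh]
  rcases hrow with hr | hr
  · rw [Nat.min_eq_left hr]
  · by_cases hba : h ≤ b - a
    · rw [Nat.min_eq_left hba]
    · rw [Nat.min_eq_right (by omega)]
      rw [List.take_of_length_le (by simp; omega), List.take_of_length_le (by simp; omega)]

theorem rows_drop_h (rows : List (List Char)) (a b h : Nat) :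
    ((rows.drop a).take (b - a)).drop h = (rows.drop (a + h)).take (b - (a + h)) := by
  rw [List.drop_take, List.drop_drop]
  congr 1; omega

theorem extract_I (rows : List (List Char)) (a b c : Nat) (d : Option Nat) (h : Nat)
    (hrow : h ≤ b - a ∨ rows.length ≤ b) (hcol : ∀ dd, d = some dd → h ≤ dd - c) :
    ((extract rows a b c d).take h).map (fun r => r.take h) =
      extract rows a (a + h) c (some (c + h)) := by
  unfold extract
  rw [← List.map_take, rows_take_h rows a b h hrow, List.map_map]
  exact List.map_congr_left (fun r _ => seg_take_h r c h d hcol)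

theorem extract_II (rows : List (List Char)) (a b c : Nat) (d : Option Nat) (h : Nat)
    (hrow : h ≤ b - a ∨ rows.length ≤ b) :
    ((extract rows a b c d).take h).map (fun r => r.drop h) =
      extract rows a (a + h) (c + h) d := by
  unfold extract
  rw [← List.map_take, rows_take_h rows a b h hrow, List.map_map]
  exact List.map_congr_left (fun r _ => seg_drop_h r c h d)

theorem extract_III (rows : List (List Char)) (a b c : Nat) (d : Option Nat) (h : Nat)
    (hcol : ∀ dd, d = some dd → h ≤ dd - c) :
    ((extract rows a b c d).drop h).map (fun r => r.take h) =
      extract rows (a + h) b c (some (c + h)) := by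
  unfold extract
  rw [← List.map_drop, rows_drop_h, List.map_map]
  exact List.map_congr_left (fun r _ => seg_take_h r c h d hcol)

theorem extract_IV (rows : List (List Char)) (a b c : Nat) (d : Option Nat) (h : Nat) :
    ((extract rows a b c d).drop h).map (fun r => r.drop h) =
      extract rows (a + h) b (c + h) d := by
  unfold extract
  rw [← List.map_drop, rows_drop_h, List.map_map]
  exact List.map_congr_left (fun r _ => seg_drop_h r c h d)

theorem main_lemma (fuel : Nat) (n : Int) (a b c : Nat) (d : Option Nat) (rows : List (List Char))
    (hn : 0 ≤ n) (hf : n.toNat < fuel)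
    (hrow : n.toNat ≤ b - a ∨ rows.length ≤ b)
    (hcol : ∀ dd, d = some dd → n.toNat ≤ dd - c) :
    pvGoB fuel rows (rows.map pvRunsOf) n a b c d = quadA fuel n (extract rows a b c d) := by
  induction fuel generalizing n a b c d with
  | zero => omega
  | succ f ih =>
    by_cases h0 : n = 0
    · subst h0; simp [pvGoB, quadA]
    · have h1 : 1 ≤ n := by omega
      simp only [pvGoB, quadA, if_neg h0]
      rw [join_nil_eq_flatten]
      rw [uniform_spec]
      cases hA : allEqOpt ((extract rows a b c d).flatten) with
      | some ch =>
        obtain ⟨hcc, hget⟩ := can_compress_of_allEq _ _ hA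
        rw [hcc, hget]
        rfl
      | none =>
        rw [can_compress_of_not_allEq _ hA]
        simp only [Bool.false_eq_true, if_false]
        have hhalf : PySem.Int.floordiv n 2 = n / 2 := PySem.Int.floordiv_eq_ediv_of_pos (by omega)
        set half := PySem.Int.floordiv n 2 with hhdef
        have hpos : 0 ≤ half := by rw [hhalf]; omega
        set h := half.toNat with hdef
        have h2n : 2 * h ≤ n.toNat ∧ h ≤ n.toNat := by
          constructor <;> (rw [hdef, hhalf]; omega)
        have hlt : h < f := by
          have hlt2 : half < n := by rw [hhalf]; omega
          have : half.toNat < n.toNat := by omega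
          omega
        have hsl1 : PySem.List.slice (extract rows a b c d) none (some half) =
            (extract rows a b c d).take h := by
          rw [PySem.List.slice_to _ hpos]
        have hsl2 : PySem.List.slice (extract rows a b c d) (some half) none =
            (extract rows a b c d).drop h := by
          rw [PySem.List.slice_from _ hpos]
        have hrow1 : ∀ r : List Char, PySem.List.slice r none (some half) = r.take h := by
          intro r; rw [PySem.List.slice_to _ hpos]
        have hrow2 : ∀ r : List Char, PySem.List.slice r (some half) none = r.drop h := by
          intro r; rw [PySem.List.slice_from _ hpos]
        simp only [hsl1, hsl2]
        simp only [funext hrow1, funext hrow2]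
        have hrowh : h ≤ b - a ∨ rows.length ≤ b := by
          rcases hrow with hr | hr
          · left; omega
          · right; exact hr
        have hcolh : ∀ dd, d = some dd → h ≤ dd - c := by
          intro dd hdd; have := hcol dd hdd; omega
        rw [extract_I rows a b c d h hrowh hcolh, extract_II rows a b c d h hrowh,
            extract_III rows a b c d h hcolh, extract_IV rows a b c d h]
        rw [← ih half a (a + h) c (some (c + h)) hpos (by omega)
              (by left; omega)
              (by intro dd hdd; injection hdd with hdd; omega),
            ← ih half a (a + h) (c + h) d hpos (by omega)
              (by left; omega)
              (by intro dd hdd; have := hcol dd hdd; omega),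
            ← ih half (a + h) b c (some (c + h)) hpos (by omega)
              (Or.imp (fun hr => by omega) (fun hr => hr) hrow)
              (by intro dd hdd; injection hdd with hdd; omega),
            ← ih half (a + h) b (c + h) d hpos (by omega)
              (Or.imp (fun hr => by omega) (fun hr => hr) hrow)
              (by intro dd hdd; have := hcol dd hdd; omega)]

theorem extract_self (rows : List (List Char)) : extract rows 0 rows.length 0 none = rows := by
  unfold extract
  simp only [List.drop_zero, Nat.sub_zero, List.take_length]
  exact (List.map_congr_left (fun r _ => by simp [segOf])).trans (List.map_id rows)

-- ===== VERDICT (by name: the statement is the Claim_ definition above) =====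
theorem make_quadtree_spec : Claim_equal_make_quadtree := by
  intro n video _ hpre
  unfold Spec_make_quadtree make_quadtree make_quadtree_alt
  have hn : 0 ≤ n := hpre
  set rows := video.map String.toList with hrows
  have hml := main_lemma (n.toNat + 1) n 0 rows.length 0 none rows hn (by omega)
    (Or.inr (le_refl _)) (by intro dd hdd; cases hdd)
  rw [extract_self] at hml
  show Option.map (fun cs => String.ofList cs) (quadA (n.toNat + 1) n rows) =
    Option.map (fun cs => String.ofList cs)
      (pvGoB (n.toNat + 1) rows (rows.map pvRunsOf) n 0 rows.length 0 none)
  rw [hml]
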